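-- pv_equiv track=rewrite | github.com/ZhazitDastan/jarvis_demo | services/app/indexer.py | search_apps
-- ===== SOURCE A (Python) =====
-- def search_apps(query: str, apps: list) -> list:
--     q = query.lower().strip()
--     exact, starts, contains = [], [], []
--     for app in apps:
--         name = app["name"]
--         if name == q:
--             exact.append(app)
--         elif name.startswith(q):
--             starts.append(app)
--         elif q in name:
--             contains.append(app)
--     return exact or starts or contains
-- ===== SOURCE B (Python) =====
-- def search_apps(query: str, apps: list) -> list:
--     q = query.lower().strip()
--     exact = [a for a in apps if a["name"] == q]
--     starts = [a for a in apps if a["name"].startswith(q)]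
--     contains = [a for a in apps if q in a["name"]]
--     return exact or starts or contains
-- ===== Notes on version B (the rewrite author's own statement) =====
-- stated objective: simpler
-- what changed: Replaces the single three-way elif-categorizing loop over a triple accumulator with three independent full-list comprehensions (one per match tier) combined by first-non-empty; correct because a later tier's result is only used when the earlier tiers matched nothing, so the missing elif guards are vacuous then.
import Mathlib
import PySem

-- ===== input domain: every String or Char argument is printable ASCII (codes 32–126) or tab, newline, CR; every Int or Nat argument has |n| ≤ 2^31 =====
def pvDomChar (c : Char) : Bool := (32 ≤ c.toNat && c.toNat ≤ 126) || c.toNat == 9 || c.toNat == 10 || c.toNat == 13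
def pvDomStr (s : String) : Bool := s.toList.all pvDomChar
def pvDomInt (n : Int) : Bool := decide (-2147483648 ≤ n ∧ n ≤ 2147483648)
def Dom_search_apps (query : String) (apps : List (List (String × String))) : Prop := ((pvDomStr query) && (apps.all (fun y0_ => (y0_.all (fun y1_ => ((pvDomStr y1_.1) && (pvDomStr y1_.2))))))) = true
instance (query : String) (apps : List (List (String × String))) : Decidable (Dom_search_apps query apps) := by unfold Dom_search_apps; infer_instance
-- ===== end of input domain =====

-- B replaces A's single three-way elif loop by three independent filters combined by first-non-empty (simpler decomposition, same result).


-- ===== PORT A =====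
-- app["name"]: first-match lookup; the KeyError case (no "name" key) is excluded by Pre_search_apps
def pvAppName (app : List (String × String)) : String :=
  ((PySem.Dict.mk app).get? "name").getD ""

-- A's loop: one pass appending each app to exactly one of the three buckets (exact, starts, contains)
def pvTriage (q : String) (apps : List (List (String × String))) :
    List (List (String × String)) × List (List (String × String)) × List (List (String × String)) :=
  apps.foldl (fun acc app =>
      let name := pvAppName app
      if name == q then (acc.1 ++ [app], acc.2.1, acc.2.2)
      else if PySem.Str.startswith name q then (acc.1, acc.2.1 ++ [app], acc.2.2)
      else if PySem.Str.isIn q name then (acc.1, acc.2.1, acc.2.2 ++ [app])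
      else acc) ([], [], [])

def search_apps (query : String) (apps : List (List (String × String))) : List (List (String × String)) :=
  let q := PySem.Str.strip (PySem.Str.lower query)
  let r := pvTriage q apps
  -- `exact or starts or contains`: first non-empty list (last one if all empty)
  if r.1 ≠ [] then r.1 else if r.2.1 ≠ [] then r.2.1 else r.2.2

-- ===== PORT B =====
def search_apps_alt (query : String) (apps : List (List (String × String))) : List (List (String × String)) :=
  let q := PySem.Str.strip (PySem.Str.lower query)
  let exact := apps.filter (fun a => pvAppName a == q)
  let starts := apps.filter (fun a => PySem.Str.startswith (pvAppName a) q)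
  let contains := apps.filter (fun a => PySem.Str.isIn q (pvAppName a))
  if exact ≠ [] then exact else if starts ≠ [] then starts else contains

-- ===== PRECONDITION & SPEC =====
-- Pre_ excludes exactly the inputs where A raises KeyError: an app dict without a "name" key.
def Pre_search_apps (query : String) (apps : List (List (String × String))) : Prop :=
  ∀ app ∈ apps, (PySem.Dict.mk app).contains "name" = true
instance (query : String) (apps : List (List (String × String))) : Decidable (Pre_search_apps query apps) := by unfold Pre_search_apps; infer_instance

def pvWitness_search_apps : String × (List (List (String × String))) :=
  ("Fire", [[("name", "firefox")], [("name", "files")], [("name", "terminal")]])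

def Spec_search_apps (query : String) (apps : List (List (String × String))) (out : List (List (String × String))) : Prop := out = search_apps_alt query apps
instance (query : String) (apps : List (List (String × String))) (out : List (List (String × String))) : Decidable (Spec_search_apps query apps out) := by unfold Spec_search_apps; infer_instance

-- ===== CLAIM (what is proved, stated in full; the proofs are below) =====
def Claim_equal_search_apps : Prop := ∀ (query : String) (apps : List (List (String × String))), Dom_search_apps query apps → Pre_search_apps query apps → Spec_search_apps query apps (search_apps query apps)

-- ===== LEMMAS AND PROOFS =====

-- A's loop characterised: the accumulated triple is three disjoint filters appended to the initial state.
theorem pv_fold_eq (q : String) (apps : List (List (String × String)))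
    (e s c : List (List (String × String))) :
    apps.foldl (fun (acc : List (List (String × String)) × List (List (String × String)) × List (List (String × String))) app =>
      let name := pvAppName app
      if name == q then (acc.1 ++ [app], acc.2.1, acc.2.2)
      else if PySem.Str.startswith name q then (acc.1, acc.2.1 ++ [app], acc.2.2)
      else if PySem.Str.isIn q name then (acc.1, acc.2.1, acc.2.2 ++ [app])
      else acc) (e, s, c)
    = (e ++ apps.filter (fun a => pvAppName a == q),
       s ++ apps.filter (fun a => !(pvAppName a == q) && PySem.Str.startswith (pvAppName a) q),
       c ++ apps.filter (fun a => !(pvAppName a == q) && !PySem.Str.startswith (pvAppName a) q && PySem.Str.isIn q (pvAppName a))) := by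
  induction apps generalizing e s c with
  | nil => simp
  | cons a t ih =>
    simp only [List.foldl_cons, List.filter_cons]
    cases h1 : (pvAppName a == q) with
    | true =>
      rw [ih]
      simp
    | false =>
      cases h2 : PySem.Str.startswith (pvAppName a) q with
      | true =>
        rw [ih]
        simp
      | false =>
        cases h3 : PySem.Str.isIn q (pvAppName a) with
        | true =>
          rw [ih]
          simp
        | false =>
          rw [ih]
          simp

theorem pvTriage_eq (q : String) (apps : List (List (String × String))) :
    pvTriage q apps
    = (apps.filter (fun a => pvAppName a == q),
       apps.filter (fun a => !(pvAppName a == q) && PySem.Str.startswith (pvAppName a) q),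
       apps.filter (fun a => !(pvAppName a == q) && !PySem.Str.startswith (pvAppName a) q && PySem.Str.isIn q (pvAppName a))) := by
  unfold pvTriage
  rw [pv_fold_eq]
  simp

-- the common first-non-empty selection, on a generic stripped query
theorem pv_main (q : String) (apps : List (List (String × String))) :
    (if (pvTriage q apps).1 ≠ [] then (pvTriage q apps).1
     else if (pvTriage q apps).2.1 ≠ [] then (pvTriage q apps).2.1 else (pvTriage q apps).2.2)
    = (if apps.filter (fun a => pvAppName a == q) ≠ [] then apps.filter (fun a => pvAppName a == q)
       else if apps.filter (fun a => PySem.Str.startswith (pvAppName a) q) ≠ [] then apps.filter (fun a => PySem.Str.startswith (pvAppName a) q)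
       else apps.filter (fun a => PySem.Str.isIn q (pvAppName a))) := by
  rw [pvTriage_eq]
  by_cases he : apps.filter (fun a => pvAppName a == q) = []
  · have hne : ∀ a ∈ apps, ¬(pvAppName a == q) = true := by
      simpa using List.filter_eq_nil_iff.mp he
    have hs : apps.filter (fun a => !(pvAppName a == q) && PySem.Str.startswith (pvAppName a) q)
        = apps.filter (fun a => PySem.Str.startswith (pvAppName a) q) := by
      apply List.filter_congr
      intro a ha
      simp [hne a ha]
    rw [if_neg (not_not_intro he), if_neg (not_not_intro he), hs]
    by_cases hsw : apps.filter (fun a => PySem.Str.startswith (pvAppName a) q) = []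
    · have hnsw : ∀ a ∈ apps, ¬(PySem.Str.startswith (pvAppName a) q = true) := by
        simpa using List.filter_eq_nil_iff.mp hsw
      have hc : apps.filter (fun a => !(pvAppName a == q) && !PySem.Str.startswith (pvAppName a) q && PySem.Str.isIn q (pvAppName a))
          = apps.filter (fun a => PySem.Str.isIn q (pvAppName a)) := by
        apply List.filter_congr
        intro a ha
        have hb : PySem.Chars.startswith (pvAppName a).toList q.toList = false := by
          simpa using hnsw a ha
        simp [hne a ha, hb]
      rw [if_neg (not_not_intro hsw), if_neg (not_not_intro hsw), hc]
    · rw [if_pos hsw, if_pos hsw]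
  · rw [if_pos he, if_pos he]

-- ===== VERDICT (by name: the statement is the Claim_ definition above) =====
theorem search_apps_spec : Claim_equal_search_apps := by
  intro query apps _ _
  exact pv_main (PySem.Str.strip (PySem.Str.lower query)) apps
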